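-- pv_equiv track=rewrite | github.com/thkyang324/SCLabAlgorithmStudy | 2주차/BOJ_26006/BOJ_26006_강태훈.py | check_check
-- ===== SOURCE A (Python) =====
-- def check_check(K, Qs):
--     for Q in Qs:
--         if any([
--             K[0] == Q[0],
--             K[1] == Q[1],
--             abs(K[0]-Q[0]) == abs(K[1]-Q[1])
--         ]):
--             return True
--     return False
-- ===== SOURCE B (Python) =====
-- def check_check(K, Qs):
--     rows, cols, dsum, ddiff = set(), set(), set(), set()
--     for r, c in Qs:
--         rows.add(r)
--         cols.add(c)
--         dsum.add(r + c)
--         ddiff.add(r - c)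
--     return (K[0] in rows or K[1] in cols
--             or K[0] + K[1] in dsum or K[0] - K[1] in ddiff)
-- ===== Notes on version B (the rewrite author's own statement) =====
-- stated objective: alternative
-- what changed: Instead of a per-queen early-return scan testing row/column/abs-diagonal, B builds four sets (rows, columns, diagonal sums, diagonal differences) in one pass and answers with four membership lookups; the abs-diagonal test is decomposed into sum- and difference-diagonal membership.
import Mathlib
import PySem

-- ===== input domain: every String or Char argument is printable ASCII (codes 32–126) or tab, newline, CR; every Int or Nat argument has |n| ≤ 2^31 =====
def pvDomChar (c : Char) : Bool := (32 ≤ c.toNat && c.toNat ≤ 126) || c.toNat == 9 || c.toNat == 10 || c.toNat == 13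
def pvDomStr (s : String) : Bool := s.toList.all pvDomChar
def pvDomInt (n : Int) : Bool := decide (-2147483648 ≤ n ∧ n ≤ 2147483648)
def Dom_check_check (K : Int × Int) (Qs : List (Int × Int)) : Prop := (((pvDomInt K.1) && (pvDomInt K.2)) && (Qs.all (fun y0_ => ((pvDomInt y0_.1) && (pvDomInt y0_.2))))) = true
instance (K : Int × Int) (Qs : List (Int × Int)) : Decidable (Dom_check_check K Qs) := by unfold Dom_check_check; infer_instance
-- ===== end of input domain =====

-- B replaces A's per-queen early-return scan by one pass populating four sets
-- (rows, cols, diagonal sums, diagonal differences) followed by four membership lookups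
-- (alternative decomposition; same asymptotic cost).


-- ===== PORT A =====
-- A: for each queen, return True as soon as one of the three checks fires.
def check_check (K : Int × Int) (Qs : List (Int × Int)) : Bool :=
  match Qs with
  | [] => false
  | Q :: rest =>
      if (K.1 == Q.1) || (K.2 == Q.2) || ((K.1 - Q.1).natAbs == (K.2 - Q.2).natAbs) then
        true
      else
        check_check K rest

-- ===== PORT B =====
-- B: one fold building the four sets, then four membership tests.
def ccStep (st : PySem.Set Int × PySem.Set Int × PySem.Set Int × PySem.Set Int)
    (Q : Int × Int) : PySem.Set Int × PySem.Set Int × PySem.Set Int × PySem.Set Int :=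
  (PySem.Set.add st.1 Q.1, PySem.Set.add st.2.1 Q.2,
   PySem.Set.add st.2.2.1 (Q.1 + Q.2), PySem.Set.add st.2.2.2 (Q.1 - Q.2))

def check_check_alt (K : Int × Int) (Qs : List (Int × Int)) : Bool :=
  let st := Qs.foldl ccStep (PySem.Set.empty, PySem.Set.empty, PySem.Set.empty, PySem.Set.empty)
  PySem.Set.contains st.1 K.1 || PySem.Set.contains st.2.1 K.2 ||
  PySem.Set.contains st.2.2.1 (K.1 + K.2) || PySem.Set.contains st.2.2.2 (K.1 - K.2)

-- ===== PRECONDITION & SPEC =====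
def Spec_check_check (K : Int × Int) (Qs : List (Int × Int)) (out : Bool) : Prop := out = check_check_alt K Qs
instance (K : Int × Int) (Qs : List (Int × Int)) (out : Bool) : Decidable (Spec_check_check K Qs out) := by unfold Spec_check_check; infer_instance

-- ===== CLAIM (what is proved, stated in full; the proofs are below) =====
def Claim_equal_check_check : Prop := ∀ (K : Int × Int) (Qs : List (Int × Int)), Dom_check_check K Qs → Spec_check_check K Qs (check_check K Qs)

-- ===== LEMMAS AND PROOFS =====

def ccHit (K : Int × Int)
    (st : PySem.Set Int × PySem.Set Int × PySem.Set Int × PySem.Set Int) : Bool :=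
  PySem.Set.contains st.1 K.1 || PySem.Set.contains st.2.1 K.2 ||
  PySem.Set.contains st.2.2.1 (K.1 + K.2) || PySem.Set.contains st.2.2.2 (K.1 - K.2)

lemma contains_add (s : PySem.Set Int) (x y : Int) :
    PySem.Set.contains (PySem.Set.add s x) y = (PySem.Set.contains s y || y == x) := by
  by_cases hm : y ∈ PySem.Set.add s x
  · rw [(PySem.Set.contains_iff _ _).mpr hm]
    rcases (PySem.Set.mem_add _ _ _).mp hm with h2 | h2
    · rw [(PySem.Set.contains_iff _ _).mpr h2]; rfl
    · subst h2; simp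
  · have h1 : PySem.Set.contains (PySem.Set.add s x) y = false := by
      rcases hc : PySem.Set.contains (PySem.Set.add s x) y with _ | _
      · rfl
      · exact absurd ((PySem.Set.contains_iff _ _).mp hc) hm
    rw [PySem.Set.mem_add] at hm
    push Not at hm
    have h2 : PySem.Set.contains s y = false := by
      rcases hc : PySem.Set.contains s y with _ | _
      · rfl
      · exact absurd ((PySem.Set.contains_iff _ _).mp hc) hm.1
    rw [h1, h2]
    have h3 : (y == x) = false := by
      rw [beq_eq_false_iff_ne]; exact hm.2
    rw [h3]; rfl

lemma ccHit_step (K : Int × Int) (st) (Q : Int × Int) :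
    ccHit K (ccStep st Q) =
      (ccHit K st || ((K.1 == Q.1) || (K.2 == Q.2) ||
        ((K.1 - Q.1).natAbs == (K.2 - Q.2).natAbs))) := by
  have habs : ((K.1 - Q.1).natAbs == (K.2 - Q.2).natAbs) =
      ((K.1 + K.2 == Q.1 + Q.2) || (K.1 - K.2 == Q.1 - Q.2)) := by
    rcases h : (K.1 - Q.1).natAbs == (K.2 - Q.2).natAbs with _|_
    · rw [beq_eq_false_iff_ne] at h
      have h1 : K.1 + K.2 ≠ Q.1 + Q.2 := fun e => h (by omega)
      have h2 : K.1 - K.2 ≠ Q.1 - Q.2 := fun e => h (by omega)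
      simp [h1, h2]
    · rw [beq_iff_eq] at h
      have : K.1 + K.2 = Q.1 + Q.2 ∨ K.1 - K.2 = Q.1 - Q.2 := by omega
      rcases this with e | e <;> simp [e]
  rw [habs]
  simp only [ccHit, ccStep, contains_add]
  rcases PySem.Set.contains st.1 K.1 <;>
  rcases PySem.Set.contains st.2.1 K.2 <;>
  rcases PySem.Set.contains st.2.2.1 (K.1 + K.2) <;>
  rcases PySem.Set.contains st.2.2.2 (K.1 - K.2) <;>
  rcases K.1 == Q.1 <;> rcases K.2 == Q.2 <;>
  rcases K.1 + K.2 == Q.1 + Q.2 <;> rcases K.1 - K.2 == Q.1 - Q.2 <;> rfl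

lemma ccHit_foldl (K : Int × Int) (Qs : List (Int × Int)) (st) :
    ccHit K (Qs.foldl ccStep st) = (ccHit K st || check_check K Qs) := by
  induction Qs generalizing st with
  | nil => simp [check_check]
  | cons Q rest ih =>
    rw [List.foldl_cons, ih, check_check]
    split
    · next h => rw [ccHit_step, h]; rcases ccHit K st <;> rfl
    · next h =>
      rw [ccHit_step]
      have : ((K.1 == Q.1) || (K.2 == Q.2) ||
          ((K.1 - Q.1).natAbs == (K.2 - Q.2).natAbs)) = false := by
        rcases hb : ((K.1 == Q.1) || (K.2 == Q.2) ||
          ((K.1 - Q.1).natAbs == (K.2 - Q.2).natAbs)) with _|_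
        · rfl
        · exact absurd hb h
      rw [this, Bool.or_false]

-- ===== VERDICT (by name: the statement is the Claim_ definition above) =====
theorem check_check_spec : Claim_equal_check_check := by
  intro K Qs _
  show check_check K Qs = check_check_alt K Qs
  have h := ccHit_foldl K Qs (PySem.Set.empty, PySem.Set.empty, PySem.Set.empty, PySem.Set.empty)
  have hempty : ccHit K ((PySem.Set.empty, PySem.Set.empty, PySem.Set.empty, PySem.Set.empty) :
      PySem.Set Int × PySem.Set Int × PySem.Set Int × PySem.Set Int) = false := rfl
  rw [hempty, Bool.false_or] at h
  exact h.symm
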